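-- pv_equiv track=rewrite | github.com/sanketvalunj/garud-drishti-soc | garud_drishti/ai_engine/playbook/playbook_generator.py | _extract_analyst_notes_from_report
-- ===== SOURCE A (Python) =====
-- def _extract_analyst_notes_from_report(report: str) -> str:
--     if not report or "ANALYST NOTES" not in report:
--         return ""
--     part = report.split("ANALYST NOTES", 1)[-1].strip()
--     for stop in ("\n\nRISK", "\n\nKEY ", "\n\nINVESTIGATION", "\n\nCONTAINMENT"):
--         if stop in part:
--             part = part.split(stop, 1)[0].strip()
--     return part.strip()[:4000]
-- ===== SOURCE B (Python) =====
-- def _extract_analyst_notes_from_report(report: str) -> str: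
--     if not report or "ANALYST NOTES" not in report:
--         return ""
--     part = report.split("ANALYST NOTES", 1)[-1].strip()
--     hits = [i for i in (part.find(stop) for stop in
--                         ("\n\nRISK", "\n\nKEY ", "\n\nINVESTIGATION", "\n\nCONTAINMENT"))
--             if i >= 0]
--     cut = min(hits) if hits else len(part)
--     return part[:cut].strip()[:4000]
-- ===== Notes on version B (the rewrite author's own statement) =====
-- stated objective: simpler
-- what changed: A truncates the notes repeatedly (split + strip once per stop marker, each pass rescanning the already-truncated text); B scans the section once per marker to collect the indices where markers occur, cuts a single time at the earliest one (or not at all), and strips once.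
-- intended difference: When a '\n\nKEY ' marker is the earliest stop marker and is separated from a later '\n\nRISK' marker only by whitespace, A's intermediate strip after the RISK cut eats the trailing space of the KEY marker so A fails to cut there and returns the notes with a dangling '\n\nKEY' header, while B cuts at the earliest marker and returns only the notes text, which is the intended behaviour. — e.g. on _extract_analyst_notes_from_report("ANALYST NOTES\nx\n\nKEY \n\nRISK"): A returns "x\n\nKEY", B returns "x"
import Mathlib
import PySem

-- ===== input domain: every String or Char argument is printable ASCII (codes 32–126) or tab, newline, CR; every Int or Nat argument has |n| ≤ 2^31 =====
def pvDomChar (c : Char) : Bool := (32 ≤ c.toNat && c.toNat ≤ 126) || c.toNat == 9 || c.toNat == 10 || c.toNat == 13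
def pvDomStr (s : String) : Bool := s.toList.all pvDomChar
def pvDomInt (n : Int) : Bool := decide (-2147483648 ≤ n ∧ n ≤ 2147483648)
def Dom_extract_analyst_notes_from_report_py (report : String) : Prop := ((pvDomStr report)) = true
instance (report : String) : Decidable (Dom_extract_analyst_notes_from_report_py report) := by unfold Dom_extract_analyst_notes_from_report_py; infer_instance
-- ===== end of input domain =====

-- B replaces A's repeated truncate-and-strip passes by a single cut at the earliest stop marker;
-- on the corner described at D_ below (A's intermediate strip eats the trailing space of a
-- '\n\nKEY ' marker) the two differ and B returns the intended value.

-- ===== PORT A =====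
-- the stop-marker tuple from the Python source (shared literals)
def pvR : List Char := "\n\nRISK".toList
def pvK : List Char := "\n\nKEY ".toList
def pvI : List Char := "\n\nINVESTIGATION".toList
def pvC : List Char := "\n\nCONTAINMENT".toList
def pvStops : List (List Char) := [pvR, pvK, pvI, pvC]

-- `report.split("ANALYST NOTES", 1)[-1].strip()` — the analyst-notes section, shared by both
-- ports (split(sep, 1) never returns an empty list, so `[-1]` is `getLastD`, exactly)
def pvSection (report : String) : List Char :=
  PySem.Chars.strip ((PySem.Chars.splitOnMax report.toList "ANALYST NOTES".toList 1).getLastD [])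

-- one iteration of A's for-loop: `if stop in part: part = part.split(stop, 1)[0].strip()`
-- (split(sep, 1) never returns an empty list, so `[0]` is `headD []`, exactly)
def pvAstep (part stop : List Char) : List Char :=
  if PySem.Chars.isIn stop part then
    PySem.Chars.strip ((PySem.Chars.splitOnMax part stop 1).headD [])
  else part

def extract_analyst_notes_from_report_py (report : String) : String :=
  -- `if not report or "ANALYST NOTES" not in report: return ""`
  if report = "" ∨ PySem.Str.isIn "ANALYST NOTES" report = false then "" else
    let part := pvSection report
    let part := pvStops.foldl pvAstep part
    -- `return part.strip()[:4000]`
    String.ofList (PySem.List.slice (PySem.Chars.strip part) none (some 4000))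

-- ===== PORT B =====
-- `hits = [i for i in (part.find(stop) for stop in (...)) if i >= 0]; cut = min(hits) if hits else len(part)`
def pvBcut (part : List Char) : Int :=
  let hits := (pvStops.map (fun stop => PySem.Chars.find part stop)).filter (fun i => decide (0 ≤ i))
  if hits.isEmpty then (PySem.Chars.len part : Int) else (PySem.List.min? hits id).getD 0

def extract_analyst_notes_from_report_py_alt (report : String) : String :=
  if report = "" ∨ PySem.Str.isIn "ANALYST NOTES" report = false then "" else
    let part := pvSection report
    -- `return part[:cut].strip()[:4000]`
    String.ofList (PySem.List.slice (PySem.Chars.strip (PySem.List.slice part none (some (pvBcut part)))) none (some 4000))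

-- ===== PRECONDITION & SPEC =====
-- When the '\n\nKEY ' marker is the earliest stop marker in the section, a '\n\nRISK' marker
-- occurs later with only whitespace between the KEY header and it, and the text before the KEY
-- marker strips to under 4000 chars, A's intermediate strip after the RISK cut eats the trailing
-- space of the KEY marker, so A fails to cut there and returns the notes with a dangling
-- '\n\nKEY' header; B cuts at the earliest marker, which is the intended value.
-- (closed-form on the input: marker positions via find and a whitespace-only gap; it runs
-- neither port and uses only pvSection, the section parser port A itself uses)
def D_extract_analyst_notes_from_report_py (report : String) : Prop :=
  PySem.Str.isIn "ANALYST NOTES" report ∧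
  let p := pvSection report
  let k := PySem.Chars.find p pvK
  PySem.Chars.isIn pvK p ∧
  PySem.Chars.rstrip (p.take (PySem.Chars.find p pvR).toNat) = p.take (k.toNat + 5) ∧
  (∀ u ∈ pvStops, PySem.Chars.isIn u p → k ≤ PySem.Chars.find p u) ∧
  (PySem.Chars.rstrip (p.take k.toNat)).length < 4000

instance (report : String) : Decidable (D_extract_analyst_notes_from_report_py report) := by
  unfold D_extract_analyst_notes_from_report_py; infer_instance

def Spec_extract_analyst_notes_from_report_py (report : String) (out : String) : Prop :=
  ¬ D_extract_analyst_notes_from_report_py report → out = extract_analyst_notes_from_report_py_alt report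

instance (report : String) (out : String) : Decidable (Spec_extract_analyst_notes_from_report_py report out) := by
  unfold Spec_extract_analyst_notes_from_report_py; infer_instance

def pvDiffWitness_extract_analyst_notes_from_report_py : String := "ANALYST NOTES\nx\n\nKEY \n\nRISK"
def pvDiffWitnessOut_extract_analyst_notes_from_report_py : String × String := ("x\n\nKEY", "x")

-- ===== CLAIM (what is proved, stated in full; the proofs are below) =====
def Claim_unchanged_extract_analyst_notes_from_report_py : Prop := ∀ (report : String), Dom_extract_analyst_notes_from_report_py report → Spec_extract_analyst_notes_from_report_py report (extract_analyst_notes_from_report_py report)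
def Claim_changed_extract_analyst_notes_from_report_py : Prop := Dom_extract_analyst_notes_from_report_py (pvDiffWitness_extract_analyst_notes_from_report_py) ∧ D_extract_analyst_notes_from_report_py (pvDiffWitness_extract_analyst_notes_from_report_py) ∧ extract_analyst_notes_from_report_py (pvDiffWitness_extract_analyst_notes_from_report_py) = pvDiffWitnessOut_extract_analyst_notes_from_report_py.1 ∧ extract_analyst_notes_from_report_py_alt (pvDiffWitness_extract_analyst_notes_from_report_py) = pvDiffWitnessOut_extract_analyst_notes_from_report_py.2 ∧ pvDiffWitnessOut_extract_analyst_notes_from_report_py.1 ≠ pvDiffWitnessOut_extract_analyst_notes_from_report_py.2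

def Claim_exact_extract_analyst_notes_from_report_py : Prop := ∀ (report : String), Dom_extract_analyst_notes_from_report_py report → D_extract_analyst_notes_from_report_py report → extract_analyst_notes_from_report_py report ≠ extract_analyst_notes_from_report_py_alt report

-- ===== LEMMAS AND PROOFS =====

-- ---------- splitOnMax with maxsplit = 1 ----------

lemma pvGoZero (sep : List Char) (fuel : Nat) (l cur : List Char) (acc : List (List Char)) :
    PySem.Chars.splitOnMax.go sep fuel 0 l cur acc = ((cur.reverse ++ l) :: acc).reverse := by
  cases fuel with
  | zero => simp [PySem.Chars.splitOnMax.go]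
  | succ n =>
    cases l with
    | nil => simp [PySem.Chars.splitOnMax.go]
    | cons c rest => simp [PySem.Chars.splitOnMax.go]

lemma pvGoAtFirst (sep : List Char) (hsep : sep ≠ []) :
    ∀ (j : Nat) (l : List Char), sep <+: l.drop j → (∀ i < j, ¬ sep <+: l.drop i) →
      ∀ fuel, l.length < fuel → ∀ cur acc,
        PySem.Chars.splitOnMax.go sep fuel 1 l cur acc =
          acc.reverse ++ [cur.reverse ++ l.take j, l.drop (j + sep.length)] := by
  intro j
  induction j with
  | zero =>
    intro l hocc _ fuel hf cur acc
    rw [List.drop_zero] at hocc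
    cases l with
    | nil => exact absurd (List.prefix_nil.mp hocc) hsep
    | cons c rest =>
      cases fuel with
      | zero => simp at hf
      | succ n =>
        have hpre : sep.isPrefixOf (c :: rest) = true := List.isPrefixOf_iff_prefix.mpr hocc
        simp only [PySem.Chars.splitOnMax.go, hpre, if_true, one_ne_zero]
        rw [pvGoZero]
        simp
  | succ jj ih =>
    intro l hocc hmin fuel hf cur acc
    cases l with
    | nil =>
      rw [List.drop_of_length_le (by simp)] at hocc
      exact absurd (List.prefix_nil.mp hocc) hsep
    | cons c rest =>
      cases fuel with
      | zero => simp at hf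
      | succ n =>
        have hpre : sep.isPrefixOf (c :: rest) = false := by
          rw [Bool.eq_false_iff]
          intro hb
          exact hmin 0 (by omega) (by simpa using List.isPrefixOf_iff_prefix.mp hb)
        simp only [PySem.Chars.splitOnMax.go, hpre, Bool.false_eq_true, if_false, one_ne_zero]
        rw [ih rest (by simpa [List.drop_succ_cons] using hocc)
          (fun i hi => by
            have h2 := hmin (i + 1) (by omega)
            simpa [List.drop_succ_cons] using h2)
          n (by simp at hf; omega) (c :: cur) acc]
        have hdrop : (c :: rest).drop (jj + 1 + sep.length) = rest.drop (jj + sep.length) := by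
          have heq : jj + 1 + sep.length = (jj + sep.length) + 1 := by omega
          rw [heq, List.drop_succ_cons]
        rw [hdrop]
        simp [List.take_succ_cons]

lemma pvSplit_one_isIn (s sep : List Char) (hsep : sep ≠ [])
    (h : PySem.Chars.isIn sep s = true) :
    PySem.Chars.splitOnMax s sep 1 =
      [s.take (PySem.Chars.find s sep).toNat,
       s.drop ((PySem.Chars.find s sep).toNat + sep.length)] := by
  unfold PySem.Chars.splitOnMax
  rw [if_neg (by norm_num), show ((1:Int)).toNat = 1 from rfl]
  have hf : 0 ≤ PySem.Chars.find s sep := by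
    rw [PySem.Chars.find_nonneg_iff]
    exact (PySem.Chars.isIn_iff_infix sep s).mp h
  have hspec := PySem.Chars.find_spec hf
  rw [pvGoAtFirst sep hsep (PySem.Chars.find s sep).toNat s hspec.1 hspec.2
    (s.length + 1) (by omega) [] []]
  simp

-- ---------- rstrip / lstrip toolkit ----------

lemma pvRstrip_prefix (xs : List Char) : PySem.Chars.rstrip xs <+: xs := by
  have h := List.dropWhile_suffix (l := xs.reverse) PySem.Chars.isspace
  have h2 : (List.dropWhile PySem.Chars.isspace xs.reverse).reverse <+: xs.reverse.reverse :=
    List.reverse_prefix.mpr h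
  simpa [PySem.Chars.rstrip] using h2

lemma pvRstrip_decomp (xs : List Char) :
    ∃ t, xs = PySem.Chars.rstrip xs ++ t ∧ ∀ c ∈ t, PySem.Chars.isspace c = true := by
  refine ⟨(xs.reverse.takeWhile PySem.Chars.isspace).reverse, ?_, ?_⟩
  · calc xs = xs.reverse.reverse := (List.reverse_reverse xs).symm
    _ = (List.takeWhile PySem.Chars.isspace xs.reverse
          ++ List.dropWhile PySem.Chars.isspace xs.reverse).reverse := by
        rw [List.takeWhile_append_dropWhile]
    _ = PySem.Chars.rstrip xs ++ (List.takeWhile PySem.Chars.isspace xs.reverse).reverse := by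
        rw [List.reverse_append]; rfl
  · intro c hc
    rw [List.mem_reverse] at hc
    exact List.mem_takeWhile_imp hc

lemma pvDropWhile_idem {α : Type} (p : α → Bool) (l : List α) :
    (l.dropWhile p).dropWhile p = l.dropWhile p := by
  induction l with
  | nil => simp
  | cons c rest ih =>
    by_cases h : p c = true
    · simp [h, ih]
    · simp [h]

lemma pvRstrip_idem (xs : List Char) :
    PySem.Chars.rstrip (PySem.Chars.rstrip xs) = PySem.Chars.rstrip xs := by
  simp [PySem.Chars.rstrip, pvDropWhile_idem]

lemma pvHead_not_ws (c : Char) (rest : List Char)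
    (h : PySem.Chars.lstrip (c :: rest) = c :: rest) : PySem.Chars.isspace c = false := by
  by_contra hb
  have hc : PySem.Chars.isspace c = true := by revert hb; cases PySem.Chars.isspace c <;> simp
  have h2 : PySem.Chars.lstrip (c :: rest) = rest.dropWhile PySem.Chars.isspace := by
    simp [PySem.Chars.lstrip, hc]
  have h3 := List.IsSuffix.length_le (List.dropWhile_suffix (l := rest) PySem.Chars.isspace)
  rw [h2] at h
  have := congrArg List.length h
  simp at this
  omega

lemma pvLstrip_rstrip (y : List Char) (hl : PySem.Chars.lstrip y = y) :
    PySem.Chars.lstrip (PySem.Chars.rstrip y) = PySem.Chars.rstrip y := by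
  rcases hring : PySem.Chars.rstrip y with _ | ⟨c, s⟩
  · simp [PySem.Chars.lstrip]
  · have hpre : PySem.Chars.rstrip y <+: y := pvRstrip_prefix y
    rw [hring] at hpre
    cases y with
    | nil => simp [List.prefix_nil] at hpre
    | cons d ys =>
      obtain ⟨r, hr⟩ := hpre
      have hcd : c = d := by
        have := congrArg (fun l => l.head?) hr
        simpa using this
      subst hcd
      have hws := pvHead_not_ws c ys hl
      simp [PySem.Chars.lstrip, hws]

lemma pvStrip_lfix (x : List Char) :
    PySem.Chars.lstrip (PySem.Chars.strip x) = PySem.Chars.strip x := by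
  have h : PySem.Chars.strip x = PySem.Chars.rstrip (PySem.Chars.lstrip x) := rfl
  rw [h]
  exact pvLstrip_rstrip _ (pvDropWhile_idem _ _)

lemma pvStrip_rfix (x : List Char) :
    PySem.Chars.rstrip (PySem.Chars.strip x) = PySem.Chars.strip x := by
  have h : PySem.Chars.strip x = PySem.Chars.rstrip (PySem.Chars.lstrip x) := rfl
  rw [h, pvRstrip_idem]

-- rlen p e = len(part[:e].rstrip())
def pvRlen (p : List Char) (e : Nat) : Nat := (PySem.Chars.rstrip (p.take e)).length

lemma pvRstrip_take_eq (p : List Char) (e : Nat) :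
    PySem.Chars.rstrip (p.take e) = p.take (pvRlen p e) := by
  have h1 : PySem.Chars.rstrip (p.take e) <+: p := (pvRstrip_prefix _).trans (List.take_prefix e p)
  rw [List.prefix_iff_eq_take] at h1
  exact h1

lemma pvRlen_le (p : List Char) (e : Nat) : pvRlen p e ≤ e := by
  have h := List.IsPrefix.length_le (pvRstrip_prefix (p.take e))
  unfold pvRlen
  simp at h
  omega

lemma pvRlen_le_len (p : List Char) (e : Nat) : pvRlen p e ≤ p.length := by
  have h := List.IsPrefix.length_le (pvRstrip_prefix (p.take e))
  unfold pvRlen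
  simp at h
  omega

lemma pvRlen_ge (p : List Char) {e k : Nat} {c : Char} (hk : k < e)
    (hc : p[k]? = some c) (hws : PySem.Chars.isspace c = false) : k + 1 ≤ pvRlen p e := by
  by_contra hcon
  obtain ⟨hkp, hval⟩ := List.getElem?_eq_some_iff.mp hc
  obtain ⟨t, ht, hwst⟩ := pvRstrip_decomp (p.take e)
  rw [pvRstrip_take_eq] at ht
  have hktake : k < (p.take e).length := by simp [List.length_take]; omega
  have hval2 : (p.take e)[k]'hktake = c := by simpa [List.getElem_take] using hval
  have hc2 : (p.take e)[k]? = some c := List.getElem?_eq_some_iff.mpr ⟨hktake, hval2⟩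
  have hlen : (p.take (pvRlen p e)).length ≤ k := by
    simp [List.length_take]
    omega
  rw [ht, List.getElem?_append_right hlen] at hc2
  have hmem : c ∈ t := List.mem_of_getElem? hc2
  have hcontr := hwst c hmem
  rw [hws] at hcontr
  exact Bool.false_ne_true hcontr

lemma pvRlen_full (p : List Char) (hr : PySem.Chars.rstrip p = p) : pvRlen p p.length = p.length := by
  simp [pvRlen, List.take_length, hr]

lemma pvRlen_idem (p : List Char) (e : Nat) : pvRlen p (pvRlen p e) = pvRlen p e := by
  have h : PySem.Chars.rstrip (p.take (pvRlen p e)) = p.take (pvRlen p e) := by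
    rw [← pvRstrip_take_eq p e, pvRstrip_idem, pvRstrip_take_eq]
  have h2 : pvRlen p (pvRlen p e) = (p.take (pvRlen p e)).length := by
    show (PySem.Chars.rstrip (p.take (pvRlen p e))).length = _
    rw [h]
  rw [h2, List.length_take]
  have := pvRlen_le_len p e
  omega

lemma pvRstrip_snoc_ws (ys : List Char) (c : Char) (hc : PySem.Chars.isspace c = true) :
    PySem.Chars.rstrip (ys ++ [c]) = PySem.Chars.rstrip ys := by
  simp [PySem.Chars.rstrip, hc]

lemma pvRlen_last (p : List Char) (e : Nat) {c : Char}
    (hc : p[pvRlen p e - 1]? = some c) (h : 0 < pvRlen p e) :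
    PySem.Chars.isspace c = false := by
  by_contra hb
  have hws : PySem.Chars.isspace c = true := by revert hb; cases PySem.Chars.isspace c <;> simp
  set r := pvRlen p e with hr
  have hfix : PySem.Chars.rstrip (p.take r) = p.take r := by
    rw [pvRstrip_take_eq p r, hr, pvRlen_idem]
  have hrlen : r ≤ p.length := by rw [hr]; exact pvRlen_le_len p e
  have htake : p.take r = p.take (r - 1) ++ [c] := by
    have hsucc : r = (r - 1) + 1 := by omega
    rw [hsucc, List.take_add_one]
    have : p[r-1]? = some c := hc
    rw [this]
    rfl
  rw [htake, pvRstrip_snoc_ws _ _ hws] at hfix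
  have hlen := congrArg List.length hfix
  have h1 := List.IsPrefix.length_le (pvRstrip_prefix (p.take (r - 1)))
  rw [List.length_append, List.length_take] at hlen
  simp [List.length_take] at h1 hlen
  omega

lemma pvLstrip_take (p : List Char) (hl : PySem.Chars.lstrip p = p) (e : Nat) :
    PySem.Chars.lstrip (p.take e) = p.take e := by
  cases p with
  | nil => simp [PySem.Chars.lstrip]
  | cons c rest =>
    cases e with
    | zero => simp [PySem.Chars.lstrip]
    | succ n =>
      have hws := pvHead_not_ws c rest hl
      simp [PySem.Chars.lstrip, hws]

lemma pvStrip_take (p : List Char) (hl : PySem.Chars.lstrip p = p) (e : Nat) :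
    PySem.Chars.strip (p.take e) = p.take (pvRlen p e) := by
  have h : PySem.Chars.strip (p.take e) = PySem.Chars.rstrip (PySem.Chars.lstrip (p.take e)) := rfl
  rw [h, pvLstrip_take p hl e, pvRstrip_take_eq]

lemma pvStrip_self (p : List Char) (hl : PySem.Chars.lstrip p = p)
    (hr : PySem.Chars.rstrip p = p) : PySem.Chars.strip p = p := by
  have h : PySem.Chars.strip p = PySem.Chars.rstrip (PySem.Chars.lstrip p) := rfl
  rw [h, hl, hr]

-- ---------- occurrences ----------

lemma pvOcc_length {t p : List Char} {j : Nat} (ht : t ≠ []) (h : t <+: p.drop j) :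
    j + t.length ≤ p.length := by
  have h1 := List.IsPrefix.length_le h
  rw [List.length_drop] at h1
  have h2 : 0 < t.length := List.length_pos_of_ne_nil ht
  omega

lemma pvOcc_getElem? {t p : List Char} {j : Nat} (h : t <+: p.drop j) {d : Nat}
    (hd : d < t.length) : p[j + d]? = t[d]? := by
  obtain ⟨r, hr⟩ := h
  have h1 : (p.drop j)[d]? = p[j + d]? := List.getElem?_drop ..
  rw [← h1, ← hr]
  exact List.getElem?_append_left hd

lemma pvOcc_take_iff {t p : List Char} {e j : Nat} (ht : t ≠ []) :
    t <+: (p.take e).drop j ↔ (t <+: p.drop j ∧ j + t.length ≤ e) := by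
  rw [List.drop_take, List.prefix_take_iff]
  have h2 : 0 < t.length := List.length_pos_of_ne_nil ht
  constructor
  · rintro ⟨h1, h3⟩; exact ⟨h1, by omega⟩
  · rintro ⟨h1, h3⟩; exact ⟨h1, by omega⟩

lemma pvIsIn_take_iff {t p : List Char} {e : Nat} (ht : t ≠ []) :
    PySem.Chars.isIn t (p.take e) = true ↔
      (PySem.Chars.isIn t p = true ∧ (PySem.Chars.find p t).toNat + t.length ≤ e) := by
  constructor
  · intro h
    obtain ⟨j, hj⟩ := (PySem.Chars.exists_prefix_drop_iff_isIn t (p.take e)).mpr h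
    rw [pvOcc_take_iff ht] at hj
    have hin : PySem.Chars.isIn t p = true :=
      (PySem.Chars.exists_prefix_drop_iff_isIn t p).mp ⟨j, hj.1⟩
    have hf : 0 ≤ PySem.Chars.find p t := by
      rw [PySem.Chars.find_nonneg_iff]
      exact (PySem.Chars.isIn_iff_infix t p).mp hin
    have hspec := PySem.Chars.find_spec hf
    have hle : (PySem.Chars.find p t).toNat ≤ j := by
      by_contra hgt
      exact hspec.2 j (by omega) hj.1
    exact ⟨hin, by omega⟩
  · rintro ⟨hin, hfit⟩
    have hf : 0 ≤ PySem.Chars.find p t := by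
      rw [PySem.Chars.find_nonneg_iff]
      exact (PySem.Chars.isIn_iff_infix t p).mp hin
    have hspec := PySem.Chars.find_spec hf
    refine (PySem.Chars.exists_prefix_drop_iff_isIn t (p.take e)).mp
      ⟨(PySem.Chars.find p t).toNat, ?_⟩
    rw [pvOcc_take_iff ht]
    exact ⟨hspec.1, hfit⟩

lemma pvFind_take_eq {t p : List Char} {e : Nat} (ht : t ≠ [])
    (h : PySem.Chars.isIn t (p.take e) = true) :
    PySem.Chars.find (p.take e) t = PySem.Chars.find p t := by
  obtain ⟨hin, hfit⟩ := (pvIsIn_take_iff ht).mp h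
  have hf : 0 ≤ PySem.Chars.find p t := by
    rw [PySem.Chars.find_nonneg_iff]; exact (PySem.Chars.isIn_iff_infix t p).mp hin
  have hf' : 0 ≤ PySem.Chars.find (p.take e) t := by
    rw [PySem.Chars.find_nonneg_iff]; exact (PySem.Chars.isIn_iff_infix t (p.take e)).mp h
  have hspec := PySem.Chars.find_spec hf
  have hspec' := PySem.Chars.find_spec hf'
  have hocc' := (pvOcc_take_iff ht).mp hspec'.1
  have h1 : (PySem.Chars.find p t).toNat ≤ (PySem.Chars.find (p.take e) t).toNat := by
    by_contra hgt
    exact hspec.2 _ (by omega) hocc'.1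
  have h2 : (PySem.Chars.find (p.take e) t).toNat ≤ (PySem.Chars.find p t).toNat := by
    by_contra hgt
    refine hspec'.2 (PySem.Chars.find p t).toNat (by omega) ?_
    rw [pvOcc_take_iff ht]
    exact ⟨hspec.1, hfit⟩
  omega

lemma pvInFacts {p t : List Char} (ht : t ≠ []) (hin : PySem.Chars.isIn t p = true) :
    0 ≤ PySem.Chars.find p t ∧ t <+: p.drop (PySem.Chars.find p t).toNat ∧
      (PySem.Chars.find p t).toNat + t.length ≤ p.length := by
  have hf : 0 ≤ PySem.Chars.find p t := by
    rw [PySem.Chars.find_nonneg_iff]; exact (PySem.Chars.isIn_iff_infix t p).mp hin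
  have hspec := PySem.Chars.find_spec hf
  exact ⟨hf, hspec.1, pvOcc_length ht hspec.1⟩

lemma pvNotTrue {b : Bool} (h : ¬ b = true) : b = false := by
  revert h; cases b <;> simp

-- ---------- the step ----------

lemma pvStep_eq (p t : List Char) (e : Nat) (hl : PySem.Chars.lstrip p = p) (ht : t ≠ []) :
    pvAstep (p.take e) t =
      if PySem.Chars.isIn t p = true ∧ (PySem.Chars.find p t).toNat + t.length ≤ e then
        p.take (pvRlen p (PySem.Chars.find p t).toNat)
      else p.take e := by
  unfold pvAstep
  by_cases h : PySem.Chars.isIn t (p.take e) = true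
  · rw [if_pos h]
    have hc := (pvIsIn_take_iff ht).mp h
    rw [if_pos hc]
    have hf2 : (PySem.Chars.find p t).toNat + t.length ≤ e := hc.2
    have hp2 : 0 < t.length := List.length_pos_of_ne_nil ht
    rw [pvSplit_one_isIn (p.take e) t ht h, pvFind_take_eq ht h]
    simp only [List.headD_cons]
    rw [List.take_take, Nat.min_eq_left (by omega), pvStrip_take p hl]
  · rw [if_neg (by simpa using pvNotTrue h)]
    rw [if_neg (fun hc => h ((pvIsIn_take_iff ht).mpr hc))]

lemma pvNoFit {p u : List Char} {e : Nat} (hl : PySem.Chars.lstrip p = p) (hu : u ≠ [])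
    (h : PySem.Chars.isIn u p = true → e < (PySem.Chars.find p u).toNat + u.length) :
    pvAstep (p.take e) u = p.take e := by
  rw [pvStep_eq p u e hl hu]
  rw [if_neg]
  rintro ⟨h1, h2⟩
  have := h h1
  omega

lemma pvStep_ge {p t : List Char} {e k : Nat} {c : Char}
    (hl : PySem.Chars.lstrip p = p) (ht : t ≠ [])
    (hke : k < e) (hc : p[k]? = some c) (hws : PySem.Chars.isspace c = false)
    (hkf : PySem.Chars.isIn t p = true → k < (PySem.Chars.find p t).toNat) :
    ∃ e', pvAstep (p.take e) t = p.take e' ∧ k < e' := by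
  rw [pvStep_eq p t e hl ht]
  by_cases hcond : PySem.Chars.isIn t p = true ∧ (PySem.Chars.find p t).toNat + t.length ≤ e
  · rw [if_pos hcond]
    refine ⟨pvRlen p (PySem.Chars.find p t).toNat, rfl, ?_⟩
    have h1 := hkf hcond.1
    have h2 := pvRlen_ge p h1 hc hws
    omega
  · rw [if_neg hcond]
    exact ⟨e, rfl, hke⟩

-- ---------- separation of stop markers ----------

lemma pvSep_lemma {t u p : List Char} {i j : Nat}
    (hno : ∀ d < t.length, 1 ≤ d → d + 1 < t.length → ¬(t[d]? = some '\n' ∧ t[d+1]? = some '\n'))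
    (hlast : ¬ t[t.length - 1]? = some '\n')
    (hu0 : u[0]? = some '\n') (hu1 : u[1]? = some '\n')
    (hti : t <+: p.drop i) (huj : u <+: p.drop j) (hij : i < j)
    (hlt : j < i + t.length) : False := by
  have hul : 1 < u.length := (List.getElem?_eq_some_iff.mp hu1).1
  have hpj : p[j]? = some '\n' := by
    have h := pvOcc_getElem? huj (d := 0) (by omega)
    simpa using h.trans hu0
  have hpt : p[j]? = t[j - i]? := by
    have h := pvOcc_getElem? hti (d := j - i) (by omega)
    rw [← h]
    congr 1
    omega
  by_cases hend : j - i + 1 < t.length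
  · have hpj1 : p[j + 1]? = some '\n' := by
      have h := pvOcc_getElem? huj (d := 1) (by omega)
      simpa using h.trans hu1
    have hpt1 : p[j + 1]? = t[j - i + 1]? := by
      have h := pvOcc_getElem? hti (d := j - i + 1) (by omega)
      rw [← h]
      congr 1
      omega
    exact hno (j - i) (by omega) (by omega) hend ⟨hpt.symm.trans hpj, hpt1.symm.trans hpj1⟩
  · have heq : j - i = t.length - 1 := by omega
    rw [heq] at hpt
    exact hlast (hpt.symm.trans hpj)

lemma pvSep_K {u p : List Char} {i j : Nat} (hu0 : u[0]? = some '\n') (hu1 : u[1]? = some '\n')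
    (hti : pvK <+: p.drop i) (huj : u <+: p.drop j) (hij : i < j) : i + 6 ≤ j := by
  have hL : pvK.length = 6 := by decide
  by_contra h
  exact pvSep_lemma (t := pvK) (by decide) (by decide) hu0 hu1 hti huj hij (by omega)

lemma pvSep_I {u p : List Char} {i j : Nat} (hu0 : u[0]? = some '\n') (hu1 : u[1]? = some '\n')
    (hti : pvI <+: p.drop i) (huj : u <+: p.drop j) (hij : i < j) : i + 15 ≤ j := by
  have hL : pvI.length = 15 := by decide
  by_contra h
  exact pvSep_lemma (t := pvI) (by decide) (by decide) hu0 hu1 hti huj hij (by omega)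

lemma pvSep_C {u p : List Char} {i j : Nat} (hu0 : u[0]? = some '\n') (hu1 : u[1]? = some '\n')
    (hti : pvC <+: p.drop i) (huj : u <+: p.drop j) (hij : i < j) : i + 13 ≤ j := by
  have hL : pvC.length = 13 := by decide
  by_contra h
  exact pvSep_lemma (t := pvC) (by decide) (by decide) hu0 hu1 hti huj hij (by omega)

lemma pvSame_start {t u p : List Char} {i : Nat}
    (hne : ¬ t[2]? = u[2]?) (ht2 : 2 < t.length) (hu2 : 2 < u.length)
    (hti : t <+: p.drop i) (hui : u <+: p.drop i) : False := by
  have h1 := pvOcc_getElem? hti (d := 2) ht2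
  have h2 := pvOcc_getElem? hui (d := 2) hu2
  exact hne (h1.symm.trans h2)

lemma pvGtOther {p t0 u : List Char} (ht0 : t0 ≠ []) (hu : u ≠ [])
    (h2t : 2 < t0.length) (h2u : 2 < u.length) (hne2 : ¬ t0[2]? = u[2]?)
    (ht0in : PySem.Chars.isIn t0 p = true)
    (hle : PySem.Chars.isIn u p = true → PySem.Chars.find p t0 ≤ PySem.Chars.find p u)
    (hin : PySem.Chars.isIn u p = true) :
    (PySem.Chars.find p t0).toNat < (PySem.Chars.find p u).toNat := by
  obtain ⟨hf0, hocc0, _⟩ := pvInFacts ht0 ht0in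
  obtain ⟨hfu, hoccu, _⟩ := pvInFacts hu hin
  have hle' := hle hin
  rcases lt_or_eq_of_le hle' with h | h
  · omega
  · exfalso
    apply pvSame_start hne2 h2t h2u hocc0
    have heq : (PySem.Chars.find p u).toNat = (PySem.Chars.find p t0).toNat := by omega
    rw [heq] at hoccu
    exact hoccu

-- ---------- B's cut ----------

lemma pvBcut_cases (p : List Char) :
    (pvBcut p = (p.length : Int) ∧ ∀ t ∈ pvStops, PySem.Chars.isIn t p = false) ∨
    (∃ t ∈ pvStops, PySem.Chars.isIn t p = true ∧ PySem.Chars.find p t = pvBcut p ∧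
      ∀ u ∈ pvStops, PySem.Chars.isIn u p = true → pvBcut p ≤ PySem.Chars.find p u) := by
  unfold pvBcut
  set hits := (pvStops.map (fun stop => PySem.Chars.find p stop)).filter (fun i => decide (0 ≤ i)) with hhits
  by_cases hemp : hits.isEmpty
  · left
    rw [if_pos hemp]
    refine ⟨by simp [PySem.Chars.len], ?_⟩
    intro t htm
    apply pvNotTrue
    intro hin
    have hnn : 0 ≤ PySem.Chars.find p t := by
      rw [PySem.Chars.find_nonneg_iff]; exact (PySem.Chars.isIn_iff_infix t p).mp hin
    have hmem : PySem.Chars.find p t ∈ hits := by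
      rw [hhits, List.mem_filter]
      exact ⟨List.mem_map_of_mem htm, by simpa using hnn⟩
    rw [List.isEmpty_iff] at hemp
    rw [hemp] at hmem
    simp at hmem
  · right
    rw [if_neg hemp]
    have hne : hits ≠ [] := fun hn => hemp (by simp [hn])
    rcases hm : PySem.List.min? hits id with _ | v
    · exact absurd ((PySem.List.min?_eq_none_iff hits id).mp hm) hne
    · have hmem := PySem.List.min?_mem hm
      rw [hhits, List.mem_filter] at hmem
      obtain ⟨hmap, hvpos⟩ := hmem
      obtain ⟨t, htm, htv⟩ := List.mem_map.mp hmap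
      refine ⟨t, htm, ?_, ?_, ?_⟩
      · rw [PySem.Chars.isIn_iff_infix, ← PySem.Chars.find_nonneg_iff, htv]
        simpa using hvpos
      · simp [htv]
      · intro u hum huin
        have hnn : 0 ≤ PySem.Chars.find p u := by
          rw [PySem.Chars.find_nonneg_iff]; exact (PySem.Chars.isIn_iff_infix u p).mp huin
        have hfin : PySem.Chars.find p u ∈ hits := by
          rw [hhits, List.mem_filter]
          exact ⟨List.mem_map_of_mem hum, by simpa using hnn⟩
        have := PySem.List.min?_isMin hm _ hfin
        simpa [hm] using this

lemma pvBcut_nonneg (p : List Char) : 0 ≤ pvBcut p := by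
  rcases pvBcut_cases p with ⟨h, _⟩ | ⟨t, _, hin, hfind, _⟩
  · rw [h]; positivity
  · rw [← hfind, PySem.Chars.find_nonneg_iff]
    exact (PySem.Chars.isIn_iff_infix t p).mp hin

-- ---------- facts about the four stop literals ----------

lemma pvStops_ne : pvR ≠ [] ∧ pvK ≠ [] ∧ pvI ≠ [] ∧ pvC ≠ [] := by decide

lemma pvStops_len : pvR.length = 6 ∧ pvK.length = 6 ∧ pvI.length = 15 ∧ pvC.length = 13 := by decide

-- the divergence condition expressed on the stripped section, as the proofs use it
def pvDcore (p : List Char) : Prop :=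
  (PySem.Chars.rstrip (p.take (PySem.Chars.find p pvR).toNat)).length = (pvBcut p).toNat + 5 ∧
  (PySem.Chars.rstrip (p.take (pvBcut p).toNat)).length < 4000

-- the section-side part of D_ (closed-form in terms of marker positions)
def pvDnew (p : List Char) : Prop :=
  PySem.Chars.isIn pvK p = true ∧
  PySem.Chars.isIn pvR p = true ∧
  PySem.Chars.find p pvK < PySem.Chars.find p pvR ∧
  (PySem.Chars.isIn pvI p = true → PySem.Chars.find p pvK < PySem.Chars.find p pvI) ∧
  (PySem.Chars.isIn pvC p = true → PySem.Chars.find p pvK < PySem.Chars.find p pvC) ∧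
  ((p.take (PySem.Chars.find p pvR).toNat).drop ((PySem.Chars.find p pvK).toNat + 5)).all
    PySem.Chars.isspace = true ∧
  (PySem.Chars.rstrip (p.take (PySem.Chars.find p pvK).toNat)).length < 4000

lemma pvRlen_zero (p : List Char) : pvRlen p 0 = 0 := by
  simp [pvRlen, PySem.Chars.rstrip]

-- under pvDnew, B's cut is the KEY marker's position
lemma pvBcut_eq_K (p : List Char) (h : pvDnew p) :
    pvBcut p = PySem.Chars.find p pvK := by
  obtain ⟨hK, hR, hKR, hKI, hKC, _, _⟩ := h
  rcases pvBcut_cases p with ⟨_, habs⟩ | ⟨t0, ht0m, ht0in, ht0f, hminall⟩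
  · exact absurd hK (by simp [habs pvK (by simp [pvStops])])
  · have hmin := hminall pvK (by simp [pvStops]) hK
    simp only [pvStops, List.mem_cons, List.not_mem_nil, or_false] at ht0m
    rcases ht0m with rfl | rfl | rfl | rfl
    · exfalso; rw [ht0f] at hKR; omega
    · rw [← ht0f]
    · exfalso; rw [ht0f] at hKI; have := hKI ht0in; omega
    · exfalso; rw [ht0f] at hKC; have := hKC ht0in; omega

-- pvDnew ↔ pvDcore (the equivalence both main proofs pivot on)
lemma pvDnew_iff_core (p : List Char) : pvDnew p ↔ pvDcore p := by
  obtain ⟨hRne, hKne, hIne, hCne⟩ := pvStops_ne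
  obtain ⟨hRlen, hKlen, hIlen, hClen⟩ := pvStops_len
  constructor
  · intro h
    obtain ⟨hK, hR, hKR, hKI, hKC, hws, h4000⟩ := h
    obtain ⟨hfKnn, hoccK, hfitK⟩ := pvInFacts hKne hK
    obtain ⟨hfRnn, hoccR, hfitR⟩ := pvInFacts hRne hR
    set fk := (PySem.Chars.find p pvK).toNat with hfk
    set fr := (PySem.Chars.find p pvR).toNat with hfr
    have hfkfr : fk < fr := by omega
    have hsep : fk + 6 ≤ fr := pvSep_K (by decide) (by decide) hoccK hoccR hfkfr
    have hbc : pvBcut p = PySem.Chars.find p pvK :=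
      pvBcut_eq_K p ⟨hK, hR, hKR, hKI, hKC, hws, h4000⟩
    have hbcn : (pvBcut p).toNat = fk := by rw [hbc]
    constructor
    · show pvRlen p fr = (pvBcut p).toNat + 5
      rw [hbcn]
      have hY : p[fk + 4]? = some 'Y' :=
        (pvOcc_getElem? hoccK (d := 4) (by decide)).trans (by decide)
      have hge : fk + 5 ≤ pvRlen p fr := pvRlen_ge p (by omega) hY (by decide)
      have hle : pvRlen p fr ≤ fk + 5 := by
        by_contra hgt
        set r := pvRlen p fr with hrv
        have hrle : r ≤ fr := pvRlen_le p fr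
        have hrlen : r ≤ p.length := pvRlen_le_len p fr
        have hidx : r - 1 < p.length := by omega
        have hcsome : p[r - 1]? = some (p[r - 1]'hidx) := List.getElem?_eq_getElem hidx
        have hnws := pvRlen_last p fr hcsome (by omega)
        -- but index r-1 lies in the whitespace gap [fk+5, fr)
        have hm : ((p.take fr).drop (fk + 5))[r - 1 - (fk + 5)]? = some (p[r - 1]'hidx) := by
          rw [List.getElem?_drop]
          have : fk + 5 + (r - 1 - (fk + 5)) = r - 1 := by omega
          rw [this, List.getElem?_take_of_lt (by omega)]
          exact hcsome
        have hmem := List.mem_of_getElem? hm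
        have := (List.all_eq_true.mp hws) _ hmem
        rw [hnws] at this
        exact Bool.false_ne_true this
      omega
    · show pvRlen p (pvBcut p).toNat < 4000
      rw [hbcn]
      exact h4000
  · intro h
    obtain ⟨hc2, hc3⟩ := h
    -- RISK must occur
    have hRin : PySem.Chars.isIn pvR p = true := by
      by_contra hno
      have hfneg : PySem.Chars.find p pvR = -1 := by
        rw [PySem.Chars.find_eq_neg_one_iff, ← PySem.Chars.isIn_eq_false_iff]
        exact pvNotTrue hno
      have hb := pvBcut_nonneg p
      have hz : pvRlen p (PySem.Chars.find p pvR).toNat = (pvBcut p).toNat + 5 := hc2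
      rw [hfneg, show ((-1 : Int)).toNat = 0 from rfl, pvRlen_zero] at hz
      omega
    obtain ⟨hfRnn, hoccR, hfitR⟩ := pvInFacts hRne hRin
    rcases pvBcut_cases p with ⟨_, habs⟩ | ⟨t0, ht0m, ht0in, ht0f, hminall⟩
    · exact absurd hRin (by simp [habs pvR (by simp [pvStops])])
    · have hmR := hminall pvR (by simp [pvStops])
      have hmK := hminall pvK (by simp [pvStops])
      have hmI := hminall pvI (by simp [pvStops])
      have hmC := hminall pvC (by simp [pvStops])
      have hc2' : pvRlen p (PySem.Chars.find p pvR).toNat = (pvBcut p).toNat + 5 := hc2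
      simp only [pvStops, List.mem_cons, List.not_mem_nil, or_false] at ht0m
      rcases ht0m with rfl | rfl | rfl | rfl
      · -- earliest = RISK: the rstrip length equation overshoots the cut
        exfalso
        have hbm : (pvBcut p).toNat = (PySem.Chars.find p pvR).toNat := by rw [← ht0f]
        have hle := pvRlen_le p (PySem.Chars.find p pvR).toNat
        rw [hbm] at hc2'
        omega
      · -- earliest = KEY
        have hbm : (pvBcut p).toNat = (PySem.Chars.find p pvK).toNat := by rw [← ht0f]
        obtain ⟨hfKnn, hoccK, hfitK⟩ := pvInFacts hKne ht0in
        have hgtR := pvGtOther hKne hRne (by decide) (by decide) (by decide)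
          ht0in (fun h2 => ht0f ▸ hmR h2) hRin
        refine ⟨ht0in, hRin, by omega, ?_, ?_, ?_, ?_⟩
        · intro hin
          have := pvGtOther hKne hIne (by decide) (by decide) (by decide)
            ht0in (fun h2 => ht0f ▸ hmI h2) hin
          have hn := (pvInFacts hIne hin).1
          omega
        · intro hin
          have := pvGtOther hKne hCne (by decide) (by decide) (by decide)
            ht0in (fun h2 => ht0f ▸ hmC h2) hin
          have hn := (pvInFacts hCne hin).1
          omega
        · -- whitespace gap from hc2'
          set fk := (PySem.Chars.find p pvK).toNat with hfk
          set fr := (PySem.Chars.find p pvR).toNat with hfr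
          rw [hbm] at hc2'
          obtain ⟨t, ht, hwst⟩ := pvRstrip_decomp (p.take fr)
          rw [pvRstrip_take_eq, hc2'] at ht
          have hlen5 : (p.take (fk + 5)).length = fk + 5 := by
            rw [List.length_take]
            have : fk + 6 ≤ p.length := by have hL : pvK.length = 6 := hKlen; omega
            omega
          rw [List.all_eq_true]
          intro c hc
          have hrle : pvRlen p fr ≤ fr := pvRlen_le p fr
          have : (p.take fr).drop (fk + 5) = t := by
            rw [ht, List.drop_append_of_le_length (by omega)]
            simp
          rw [this] at hc
          exact hwst c hc
        · rw [hbm] at hc3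
          exact hc3
      · -- earliest = INVESTIGATION: its final 'N' survives the strip — contradiction
        exfalso
        have hbm : (pvBcut p).toNat = (PySem.Chars.find p pvI).toNat := by rw [← ht0f]
        obtain ⟨hf0, hocc0, hfit0⟩ := pvInFacts hIne ht0in
        have hgtR := pvGtOther hIne hRne (by decide) (by decide) (by decide)
          ht0in (fun h2 => ht0f ▸ hmR h2) hRin
        have hsep := pvSep_I (u := pvR) (by decide) (by decide) hocc0 hoccR hgtR
        have hN : p[(PySem.Chars.find p pvI).toNat + 14]? = some 'N' :=
          (pvOcc_getElem? hocc0 (d := 14) (by decide)).trans (by decide)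
        have hge := pvRlen_ge p (e := (PySem.Chars.find p pvR).toNat)
          (k := (PySem.Chars.find p pvI).toNat + 14) (by omega) hN (by decide)
        rw [hbm] at hc2'
        omega
      · -- earliest = CONTAINMENT: its final 'T' survives the strip — contradiction
        exfalso
        have hbm : (pvBcut p).toNat = (PySem.Chars.find p pvC).toNat := by rw [← ht0f]
        obtain ⟨hf0, hocc0, hfit0⟩ := pvInFacts hCne ht0in
        have hgtR := pvGtOther hCne hRne (by decide) (by decide) (by decide)
          ht0in (fun h2 => ht0f ▸ hmR h2) hRin
        have hsep := pvSep_C (u := pvR) (by decide) (by decide) hocc0 hoccR hgtR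
        have hT : p[(PySem.Chars.find p pvC).toNat + 12]? = some 'T' :=
          (pvOcc_getElem? hocc0 (d := 12) (by decide)).trans (by decide)
        have hge := pvRlen_ge p (e := (PySem.Chars.find p pvR).toNat)
          (k := (PySem.Chars.find p pvC).toNat + 12) (by omega) hT (by decide)
        rw [hbm] at hc2'
        omega

-- D_'s section-side condition, as a named predicate (defeq to D_'s inline body)
def pvDnew2 (p : List Char) : Prop :=
  let k := PySem.Chars.find p pvK
  PySem.Chars.isIn pvK p ∧
  PySem.Chars.rstrip (p.take (PySem.Chars.find p pvR).toNat) = p.take (k.toNat + 5) ∧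
  (∀ u ∈ pvStops, PySem.Chars.isIn u p → k ≤ PySem.Chars.find p u) ∧
  (PySem.Chars.rstrip (p.take k.toNat)).length < 4000

lemma pvDnew2_iff (p : List Char) : pvDnew2 p ↔ pvDnew p := by
  obtain ⟨hRne, hKne, hIne, hCne⟩ := pvStops_ne
  obtain ⟨hRlen, hKlen, hIlen, hClen⟩ := pvStops_len
  unfold pvDnew2 pvDnew
  constructor
  · rintro ⟨hK, heq, hall, h4⟩
    obtain ⟨hfKnn, hoccK, hfitK⟩ := pvInFacts hKne hK
    set fk := (PySem.Chars.find p pvK).toNat with hfk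
    have hfit6 : fk + 6 ≤ p.length := by have hL : pvK.length = 6 := hKlen; omega
    have hlen5 : (p.take (fk + 5)).length = fk + 5 := by
      rw [List.length_take]; omega
    have hrlen : pvRlen p (PySem.Chars.find p pvR).toNat = fk + 5 := by
      show (PySem.Chars.rstrip (p.take (PySem.Chars.find p pvR).toNat)).length = fk + 5
      rw [heq, hlen5]
    have hRin : PySem.Chars.isIn pvR p = true := by
      by_contra hno
      have hfneg : PySem.Chars.find p pvR = -1 := by
        rw [PySem.Chars.find_eq_neg_one_iff, ← PySem.Chars.isIn_eq_false_iff]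
        exact pvNotTrue hno
      rw [hfneg, show ((-1 : Int)).toNat = 0 from rfl, pvRlen_zero] at hrlen
      omega
    have hfRnn := (pvInFacts hRne hRin).1
    have hfr : fk + 5 ≤ (PySem.Chars.find p pvR).toNat := by
      have := pvRlen_le p (PySem.Chars.find p pvR).toNat
      omega
    have hmI : PySem.Chars.isIn pvI p = true →
        PySem.Chars.find p pvK < PySem.Chars.find p pvI := by
      intro hin
      have := pvGtOther hKne hIne (by decide) (by decide) (by decide) hK
        (fun h2 => hall pvI (by simp [pvStops]) h2) hin
      have hn := (pvInFacts hIne hin).1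
      omega
    have hmC : PySem.Chars.isIn pvC p = true →
        PySem.Chars.find p pvK < PySem.Chars.find p pvC := by
      intro hin
      have := pvGtOther hKne hCne (by decide) (by decide) (by decide) hK
        (fun h2 => hall pvC (by simp [pvStops]) h2) hin
      have hn := (pvInFacts hCne hin).1
      omega
    refine ⟨hK, hRin, by omega, hmI, hmC, ?_, h4⟩
    obtain ⟨t, ht, hwst⟩ := pvRstrip_decomp (p.take (PySem.Chars.find p pvR).toNat)
    rw [heq] at ht
    rw [List.all_eq_true]
    intro c hc
    have hdropt : (p.take (PySem.Chars.find p pvR).toNat).drop (fk + 5) = t := by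
      rw [ht, List.drop_append_of_le_length (by omega)]
      simp
    rw [hdropt] at hc
    exact hwst c hc
  · intro h
    obtain ⟨hK, hR, hKR, hKI, hKC, hws, h4⟩ := h
    have hcore := (pvDnew_iff_core p).mp ⟨hK, hR, hKR, hKI, hKC, hws, h4⟩
    have hbc : pvBcut p = PySem.Chars.find p pvK :=
      pvBcut_eq_K p ⟨hK, hR, hKR, hKI, hKC, hws, h4⟩
    refine ⟨hK, ?_, ?_, h4⟩
    · rw [pvRstrip_take_eq]
      have : pvRlen p (PySem.Chars.find p pvR).toNat = (PySem.Chars.find p pvK).toNat + 5 := by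
        have hc2 : pvRlen p (PySem.Chars.find p pvR).toNat = (pvBcut p).toNat + 5 := hcore.1
        have : (pvBcut p).toNat = (PySem.Chars.find p pvK).toNat := by rw [hbc]
        omega
      rw [this]
    · intro u hu hin
      simp only [pvStops, List.mem_cons, List.not_mem_nil, or_false] at hu
      rcases hu with rfl | rfl | rfl | rfl
      · omega
      · omega
      · have := hKI hin; omega
      · have := hKC hin; omega

lemma pvD_unfold (report : String) :
    D_extract_analyst_notes_from_report_py report ↔
      (PySem.Str.isIn "ANALYST NOTES" report = true ∧ pvDnew (pvSection report)) := by
  unfold D_extract_analyst_notes_from_report_py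
  exact and_congr Iff.rfl (pvDnew2_iff (pvSection report))

-- ---------- the master lemma: A's truncation chain vs the single earliest cut ----------

lemma pvChain (p : List Char) (hl : PySem.Chars.lstrip p = p) (hr : PySem.Chars.rstrip p = p)
    (hnd : ¬ pvDcore p) :
    (PySem.Chars.strip (pvStops.foldl pvAstep p)).take 4000
      = (p.take (pvRlen p (pvBcut p).toNat)).take 4000 := by
  obtain ⟨hRne, hKne, hIne, hCne⟩ := pvStops_ne
  obtain ⟨hRlen, hKlen, hIlen, hClen⟩ := pvStops_len
  have hfold : pvStops.foldl pvAstep p =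
      pvAstep (pvAstep (pvAstep (pvAstep p pvR) pvK) pvI) pvC := by
    simp [pvStops]
  have hstart : pvAstep p pvR = pvAstep (p.take p.length) pvR := by rw [List.take_length]
  rw [hfold, hstart]
  rcases pvBcut_cases p with ⟨hcv, habs⟩ | ⟨t0, ht0m, ht0in, ht0f, hminall⟩
  · -- no stop marker occurs: every pass of A's loop is a no-op
    have habsR := habs pvR (by simp [pvStops])
    have habsK := habs pvK (by simp [pvStops])
    have habsI := habs pvI (by simp [pvStops])
    have habsC := habs pvC (by simp [pvStops])
    have h1 := pvNoFit (e := p.length) hl hRne (fun hin => by rw [habsR] at hin; cases hin)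
    have h2 := pvNoFit (e := p.length) hl hKne (fun hin => by rw [habsK] at hin; cases hin)
    have h3 := pvNoFit (e := p.length) hl hIne (fun hin => by rw [habsI] at hin; cases hin)
    have h4 := pvNoFit (e := p.length) hl hCne (fun hin => by rw [habsC] at hin; cases hin)
    rw [h1, h2, h3, h4, List.take_length, pvStrip_self p hl hr, hcv]
    simp [pvRlen_full p hr, List.take_length]
  · -- some marker occurs; t0 is the one at the earliest position
    have hmR := hminall pvR (by simp [pvStops])
    have hmK := hminall pvK (by simp [pvStops])
    have hmI := hminall pvI (by simp [pvStops])
    have hmC := hminall pvC (by simp [pvStops])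
    simp only [pvStops, List.mem_cons, List.not_mem_nil, or_false] at ht0m
    rcases ht0m with rfl | rfl | rfl | rfl
    · -- t0 = pvR : A cuts at RISK first; later passes are no-ops
      obtain ⟨hf0, hocc0, hfit0⟩ := pvInFacts hRne ht0in
      have hbm : (pvBcut p).toNat = (PySem.Chars.find p pvR).toNat := by rw [← ht0f]
      have hgtK := fun hin => pvGtOther hRne hKne (by decide) (by decide) (by decide)
        ht0in (fun h2 => ht0f ▸ hmK h2) hin
      have hgtI := fun hin => pvGtOther hRne hIne (by decide) (by decide) (by decide)
        ht0in (fun h2 => ht0f ▸ hmI h2) hin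
      have hgtC := fun hin => pvGtOther hRne hCne (by decide) (by decide) (by decide)
        ht0in (fun h2 => ht0f ▸ hmC h2) hin
      have hs1 : pvAstep (p.take p.length) pvR
          = p.take (pvRlen p (PySem.Chars.find p pvR).toNat) := by
        rw [pvStep_eq p pvR p.length hl hRne, if_pos ⟨ht0in, hfit0⟩]
      have hrle := pvRlen_le p (PySem.Chars.find p pvR).toNat
      have hs2 := pvNoFit (e := pvRlen p (PySem.Chars.find p pvR).toNat) hl hKne
        (fun hin => by have := hgtK hin; have hL : pvK.length = 6 := hKlen; omega)
      have hs3 := pvNoFit (e := pvRlen p (PySem.Chars.find p pvR).toNat) hl hIne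
        (fun hin => by have := hgtI hin; have hL : pvI.length = 15 := hIlen; omega)
      have hs4 := pvNoFit (e := pvRlen p (PySem.Chars.find p pvR).toNat) hl hCne
        (fun hin => by have := hgtC hin; have hL : pvC.length = 13 := hClen; omega)
      rw [hs1, hs2, hs3, hs4, pvStrip_take p hl, pvRlen_idem, hbm]
    · -- t0 = pvK : KEY is earliest; whether A's KEY pass still fires depends on whether the
      -- strip after the RISK cut reaches back to the KEY marker's trailing space
      obtain ⟨hf0, hocc0, hfit0⟩ := pvInFacts hKne ht0in
      have hbm : (pvBcut p).toNat = (PySem.Chars.find p pvK).toNat := by rw [← ht0f]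
      have hgtI := fun hin => pvGtOther hKne hIne (by decide) (by decide) (by decide)
        ht0in (fun h2 => ht0f ▸ hmI h2) hin
      have hgtC := fun hin => pvGtOther hKne hCne (by decide) (by decide) (by decide)
        ht0in (fun h2 => ht0f ▸ hmC h2) hin
      have hrleK := pvRlen_le p (PySem.Chars.find p pvK).toNat
      have hs3 := pvNoFit (e := pvRlen p (PySem.Chars.find p pvK).toNat) hl hIne
        (fun hin => by have := hgtI hin; have hL : pvI.length = 15 := hIlen; omega)
      have hs4 := pvNoFit (e := pvRlen p (PySem.Chars.find p pvK).toNat) hl hCne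
        (fun hin => by have := hgtC hin; have hL : pvC.length = 13 := hClen; omega)
      by_cases hRin : PySem.Chars.isIn pvR p = true
      · have hgtR := pvGtOther hKne hRne (by decide) (by decide) (by decide)
          ht0in (fun h2 => ht0f ▸ hmR h2) hRin
        obtain ⟨hfRnn, hoccR, hfitR⟩ := pvInFacts hRne hRin
        have hsep : (PySem.Chars.find p pvK).toNat + 6 ≤ (PySem.Chars.find p pvR).toNat :=
          pvSep_K (u := pvR) (by decide) (by decide) hocc0 hoccR hgtR
        have hY : p[(PySem.Chars.find p pvK).toNat + 4]? = some 'Y' :=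
          (pvOcc_getElem? hocc0 (d := 4) (by decide)).trans (by decide)
        have hwsY : PySem.Chars.isspace 'Y' = false := by decide
        have he5 : (PySem.Chars.find p pvK).toNat + 5 ≤ pvRlen p (PySem.Chars.find p pvR).toNat :=
          pvRlen_ge p (by omega) hY hwsY
        have hs1 : pvAstep (p.take p.length) pvR
            = p.take (pvRlen p (PySem.Chars.find p pvR).toNat) := by
          rw [pvStep_eq p pvR p.length hl hRne, if_pos ⟨hRin, hfitR⟩]
        by_cases hclip : pvRlen p (PySem.Chars.find p pvR).toNat = (PySem.Chars.find p pvK).toNat + 5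
        · -- the strip ate the KEY marker's space; ¬D_ forces the ≥ 4000 corner where
          -- the final [:4000] hides the difference
          have h4000 : ¬ ((PySem.Chars.rstrip (p.take (pvBcut p).toNat)).length < 4000) := by
            intro hlt
            apply hnd
            refine ⟨?_, hlt⟩
            show pvRlen p (PySem.Chars.find p pvR).toNat = (pvBcut p).toNat + 5
            rw [hbm]
            exact hclip
          have h4000' : 4000 ≤ pvRlen p (PySem.Chars.find p pvK).toNat := by
            have hh : (PySem.Chars.rstrip (p.take (pvBcut p).toNat)).length
                = pvRlen p (pvBcut p).toNat := rfl
            rw [hh, hbm] at h4000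
            omega
          have hs2 := pvNoFit (e := (PySem.Chars.find p pvK).toNat + 5) hl hKne
            (fun _ => by have hL : pvK.length = 6 := hKlen; omega)
          have hs3' := pvNoFit (e := (PySem.Chars.find p pvK).toNat + 5) hl hIne
            (fun hin => by have := hgtI hin; have hL : pvI.length = 15 := hIlen; omega)
          have hs4' := pvNoFit (e := (PySem.Chars.find p pvK).toNat + 5) hl hCne
            (fun hin => by have := hgtC hin; have hL : pvC.length = 13 := hClen; omega)
          rw [hs1, hclip, hs2, hs3', hs4', pvStrip_take p hl]
          have hm5 : pvRlen p ((PySem.Chars.find p pvK).toNat + 5)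
              = (PySem.Chars.find p pvK).toNat + 5 := by
            have hge := pvRlen_ge p (e := (PySem.Chars.find p pvK).toNat + 5)
              (k := (PySem.Chars.find p pvK).toNat + 4) (by omega) hY hwsY
            have hle := pvRlen_le p ((PySem.Chars.find p pvK).toNat + 5)
            omega
          rw [hm5, hbm, List.take_take, List.take_take]
          have e1 : min 4000 ((PySem.Chars.find p pvK).toNat + 5) = 4000 := by omega
          have e2 : min 4000 (pvRlen p (PySem.Chars.find p pvK).toNat) = 4000 := by omega
          rw [e1, e2]
        · -- the strip stops strictly after the KEY marker, so the KEY pass still cuts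
          have hs2 : pvAstep (p.take (pvRlen p (PySem.Chars.find p pvR).toNat)) pvK
              = p.take (pvRlen p (PySem.Chars.find p pvK).toNat) := by
            rw [pvStep_eq p pvK _ hl hKne,
              if_pos ⟨ht0in, by have hL : pvK.length = 6 := hKlen; omega⟩]
          rw [hs1, hs2, hs3, hs4, pvStrip_take p hl, pvRlen_idem, hbm]
      · -- RISK does not occur: A's first pass is a no-op and the KEY pass cuts
        have hs1 := pvNoFit (e := p.length) hl hRne (fun hin => absurd hin hRin)
        have hs2 : pvAstep (p.take p.length) pvK
            = p.take (pvRlen p (PySem.Chars.find p pvK).toNat) := by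
          rw [pvStep_eq p pvK p.length hl hKne, if_pos ⟨ht0in, hfit0⟩]
        rw [hs1, hs2, hs3, hs4, pvStrip_take p hl, pvRlen_idem, hbm]
    · -- t0 = pvI : any earlier RISK/KEY pass cuts strictly after the INVESTIGATION
      -- marker (its final 'N' survives every strip), then the INVESTIGATION pass cuts
      obtain ⟨hf0, hocc0, hfit0⟩ := pvInFacts hIne ht0in
      have hbm : (pvBcut p).toNat = (PySem.Chars.find p pvI).toNat := by rw [← ht0f]
      have hpN : p[(PySem.Chars.find p pvI).toNat + 14]? = some 'N' := by
        have h := pvOcc_getElem? hocc0 (d := 14) (by rw [hIlen]; omega)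
        exact h.trans (by decide)
      have hwsN : PySem.Chars.isspace 'N' = false := by decide
      have hgtR : PySem.Chars.isIn pvR p = true →
          (PySem.Chars.find p pvI).toNat + 14 < (PySem.Chars.find p pvR).toNat := by
        intro hin
        have h1 := pvGtOther hIne hRne (by decide) (by decide) (by decide)
          ht0in (fun h2 => ht0f ▸ hmR h2) hin
        have hoccR := (pvInFacts hRne hin).2.1
        have h3 := pvSep_I (u := pvR) (by decide) (by decide) hocc0 hoccR h1
        omega
      have hgtK : PySem.Chars.isIn pvK p = true →
          (PySem.Chars.find p pvI).toNat + 14 < (PySem.Chars.find p pvK).toNat := by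
        intro hin
        have h1 := pvGtOther hIne hKne (by decide) (by decide) (by decide)
          ht0in (fun h2 => ht0f ▸ hmK h2) hin
        have hoccK := (pvInFacts hKne hin).2.1
        have h3 := pvSep_I (u := pvK) (by decide) (by decide) hocc0 hoccK h1
        omega
      have hgtC := fun hin => pvGtOther hIne hCne (by decide) (by decide) (by decide)
        ht0in (fun h2 => ht0f ▸ hmC h2) hin
      have hke : (PySem.Chars.find p pvI).toNat + 14 < p.length := by
        have hL : pvI.length = 15 := hIlen; omega
      obtain ⟨e1, hs1, he1⟩ := pvStep_ge (e := p.length) hl hRne hke hpN hwsN hgtR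
      obtain ⟨e2, hs2, he2⟩ := pvStep_ge (e := e1) hl hKne he1 hpN hwsN hgtK
      have hs3 : pvAstep (p.take e2) pvI
          = p.take (pvRlen p (PySem.Chars.find p pvI).toNat) := by
        rw [pvStep_eq p pvI e2 hl hIne,
          if_pos ⟨ht0in, by have hL : pvI.length = 15 := hIlen; omega⟩]
      have hrleI := pvRlen_le p (PySem.Chars.find p pvI).toNat
      have hs4 := pvNoFit (e := pvRlen p (PySem.Chars.find p pvI).toNat) hl hCne
        (fun hin => by have := hgtC hin; have hL : pvC.length = 13 := hClen; omega)
      rw [hs1, hs2, hs3, hs4, pvStrip_take p hl, pvRlen_idem, hbm]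
    · -- t0 = pvC : symmetric to the previous case with the final 'T' of CONTAINMENT
      obtain ⟨hf0, hocc0, hfit0⟩ := pvInFacts hCne ht0in
      have hbm : (pvBcut p).toNat = (PySem.Chars.find p pvC).toNat := by rw [← ht0f]
      have hpT : p[(PySem.Chars.find p pvC).toNat + 12]? = some 'T' := by
        have h := pvOcc_getElem? hocc0 (d := 12) (by rw [hClen]; omega)
        exact h.trans (by decide)
      have hwsT : PySem.Chars.isspace 'T' = false := by decide
      have hgtR : PySem.Chars.isIn pvR p = true →
          (PySem.Chars.find p pvC).toNat + 12 < (PySem.Chars.find p pvR).toNat := by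
        intro hin
        have h1 := pvGtOther hCne hRne (by decide) (by decide) (by decide)
          ht0in (fun h2 => ht0f ▸ hmR h2) hin
        have hoccR := (pvInFacts hRne hin).2.1
        have h3 := pvSep_C (u := pvR) (by decide) (by decide) hocc0 hoccR h1
        omega
      have hgtK : PySem.Chars.isIn pvK p = true →
          (PySem.Chars.find p pvC).toNat + 12 < (PySem.Chars.find p pvK).toNat := by
        intro hin
        have h1 := pvGtOther hCne hKne (by decide) (by decide) (by decide)
          ht0in (fun h2 => ht0f ▸ hmK h2) hin
        have hoccK := (pvInFacts hKne hin).2.1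
        have h3 := pvSep_C (u := pvK) (by decide) (by decide) hocc0 hoccK h1
        omega
      have hgtI : PySem.Chars.isIn pvI p = true →
          (PySem.Chars.find p pvC).toNat + 12 < (PySem.Chars.find p pvI).toNat := by
        intro hin
        have h1 := pvGtOther hCne hIne (by decide) (by decide) (by decide)
          ht0in (fun h2 => ht0f ▸ hmI h2) hin
        have hoccI := (pvInFacts hIne hin).2.1
        have h3 := pvSep_C (u := pvI) (by decide) (by decide) hocc0 hoccI h1
        omega
      have hke : (PySem.Chars.find p pvC).toNat + 12 < p.length := by
        have hL : pvC.length = 13 := hClen; omega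
      obtain ⟨e1, hs1, he1⟩ := pvStep_ge (e := p.length) hl hRne hke hpT hwsT hgtR
      obtain ⟨e2, hs2, he2⟩ := pvStep_ge (e := e1) hl hKne he1 hpT hwsT hgtK
      obtain ⟨e3, hs3, he3⟩ := pvStep_ge (e := e2) hl hIne he2 hpT hwsT hgtI
      have hs4 : pvAstep (p.take e3) pvC
          = p.take (pvRlen p (PySem.Chars.find p pvC).toNat) := by
        rw [pvStep_eq p pvC e3 hl hCne,
          if_pos ⟨ht0in, by have hL : pvC.length = 13 := hClen; omega⟩]
      rw [hs1, hs2, hs3, hs4, pvStrip_take p hl, pvRlen_idem, hbm]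

-- ===== VERDICT =====

theorem extract_analyst_notes_from_report_py_spec :
    Claim_unchanged_extract_analyst_notes_from_report_py := by
  intro report _hdom
  unfold Spec_extract_analyst_notes_from_report_py
  intro hnd
  unfold extract_analyst_notes_from_report_py extract_analyst_notes_from_report_py_alt
  by_cases hg : report = "" ∨ PySem.Str.isIn "ANALYST NOTES" report = false
  · rw [if_pos hg, if_pos hg]
  · rw [if_neg hg, if_neg hg]
    simp only []
    rw [not_or] at hg
    have hgin : PySem.Str.isIn "ANALYST NOTES" report = true := by
      cases hb : PySem.Str.isIn "ANALYST NOTES" report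
      · exact absurd hb hg.2
      · rfl
    set p := pvSection report with hp
    have hpl : PySem.Chars.lstrip p = p := by rw [hp]; exact pvStrip_lfix _
    have hpr : PySem.Chars.rstrip p = p := by rw [hp]; exact pvStrip_rfix _
    have hndc : ¬ pvDcore p := by
      intro hd
      apply hnd
      rw [pvD_unfold]
      exact ⟨hgin, (pvDnew_iff_core p).mpr hd⟩
    have hchain := pvChain p hpl hpr hndc
    have hbslice : PySem.List.slice p none (some (pvBcut p)) = p.take (pvBcut p).toNat :=
      PySem.List.slice_to p (pvBcut_nonneg p)
    have hbstrip : PySem.Chars.strip (p.take (pvBcut p).toNat) = p.take (pvRlen p (pvBcut p).toNat) :=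
      pvStrip_take p hpl _
    have h4 : ((4000 : Int)).toNat = 4000 := rfl
    rw [hbslice, hbstrip,
      PySem.List.slice_to (PySem.Chars.strip (pvStops.foldl pvAstep p)) (by norm_num),
      PySem.List.slice_to (p.take (pvRlen p (pvBcut p).toNat)) (by norm_num), h4, hchain]

set_option maxRecDepth 8000 in
theorem extract_analyst_notes_from_report_py_changed :
    Claim_changed_extract_analyst_notes_from_report_py := by
  unfold Claim_changed_extract_analyst_notes_from_report_py
  refine ⟨by decide, ?_, by decide, by decide, by decide⟩
  rw [pvD_unfold]
  have hp : pvSection pvDiffWitness_extract_analyst_notes_from_report_py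
      = "x\n\nKEY \n\nRISK".toList := by decide
  refine ⟨by decide, ?_⟩
  rw [hp]
  unfold pvDnew
  decide

set_option maxRecDepth 8000 in
theorem extract_analyst_notes_from_report_py_tight :
    Claim_exact_extract_analyst_notes_from_report_py := by
  intro report _hdom hD
  rw [pvD_unfold] at hD
  obtain ⟨hgin, hdn⟩ := hD
  obtain ⟨hc2, hc3⟩ := (pvDnew_iff_core (pvSection report)).mp hdn
  have hg : ¬ (report = "" ∨ PySem.Str.isIn "ANALYST NOTES" report = false) := by
    rintro (h1 | h2)
    · subst h1
      exact absurd hgin (by decide)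
    · rw [h2] at hgin
      exact absurd hgin (by decide)
  unfold extract_analyst_notes_from_report_py extract_analyst_notes_from_report_py_alt
  rw [if_neg hg, if_neg hg]
  simp only []
  obtain ⟨hRne, hKne, hIne, hCne⟩ := pvStops_ne
  obtain ⟨hRlen, hKlen, hIlen, hClen⟩ := pvStops_len
  set p := pvSection report with hpdef
  have hpl : PySem.Chars.lstrip p = p := by rw [hpdef]; exact pvStrip_lfix _
  have hc2' : pvRlen p (PySem.Chars.find p pvR).toNat = (pvBcut p).toNat + 5 := hc2
  have hc3' : pvRlen p (pvBcut p).toNat < 4000 := hc3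
  have hdn2 := hdn
  obtain ⟨hK, hRin, hKRlt, _, _, _, _⟩ := hdn2
  have hbc : pvBcut p = PySem.Chars.find p pvK := pvBcut_eq_K p hdn
  have hbm : (pvBcut p).toNat = (PySem.Chars.find p pvK).toNat := by rw [hbc]
  obtain ⟨hf0, hocc0, hfit0⟩ := pvInFacts hKne hK
  obtain ⟨hfRnn, hoccR, hfitR⟩ := pvInFacts hRne hRin
  have hgtR : (PySem.Chars.find p pvK).toNat < (PySem.Chars.find p pvR).toNat := by omega
  have hY : p[(PySem.Chars.find p pvK).toNat + 4]? = some 'Y' :=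
    (pvOcc_getElem? hocc0 (d := 4) (by decide)).trans (by decide)
  have hwsY : PySem.Chars.isspace 'Y' = false := by decide
  rw [hbm] at hc2' hc3'
  -- I and C occur, if at all, strictly after the KEY cut end
  have hgtI : PySem.Chars.isIn pvI p = true →
      (PySem.Chars.find p pvK).toNat < (PySem.Chars.find p pvI).toNat := by
    intro hin
    have h1 := hdn.2.2.2.1 hin
    have hn := (pvInFacts hIne hin).1
    omega
  have hgtC : PySem.Chars.isIn pvC p = true →
      (PySem.Chars.find p pvK).toNat < (PySem.Chars.find p pvC).toNat := by
    intro hin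
    have h1 := hdn.2.2.2.2.1 hin
    have hn := (pvInFacts hCne hin).1
    omega
  have hgtI' : PySem.Chars.isIn pvI p = true →
      (PySem.Chars.find p pvK).toNat + 5 < (PySem.Chars.find p pvI).toNat := by
    intro hin
    have hoccI := (pvInFacts hIne hin).2.1
    have := pvSep_K (u := pvI) (by decide) (by decide) hocc0 hoccI (hgtI hin)
    omega
  have hgtC' : PySem.Chars.isIn pvC p = true →
      (PySem.Chars.find p pvK).toNat + 5 < (PySem.Chars.find p pvC).toNat := by
    intro hin
    have hoccC := (pvInFacts hCne hin).2.1
    have := pvSep_K (u := pvC) (by decide) (by decide) hocc0 hoccC (hgtC hin)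
    omega
  have hfold : pvStops.foldl pvAstep p =
      pvAstep (pvAstep (pvAstep (pvAstep p pvR) pvK) pvI) pvC := by
    simp [pvStops]
  have hstart : pvAstep p pvR = pvAstep (p.take p.length) pvR := by rw [List.take_length]
  have hs1 : pvAstep (p.take p.length) pvR
      = p.take (pvRlen p (PySem.Chars.find p pvR).toNat) := by
    rw [pvStep_eq p pvR p.length hpl hRne, if_pos ⟨hRin, hfitR⟩]
  have hs2 := pvNoFit (e := (PySem.Chars.find p pvK).toNat + 5) hpl hKne
    (fun _ => by have hL : pvK.length = 6 := hKlen; omega)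
  have hs3 := pvNoFit (e := (PySem.Chars.find p pvK).toNat + 5) hpl hIne
    (fun hin => by have := hgtI' hin; have hL : pvI.length = 15 := hIlen; omega)
  have hs4 := pvNoFit (e := (PySem.Chars.find p pvK).toNat + 5) hpl hCne
    (fun hin => by have := hgtC' hin; have hL : pvC.length = 13 := hClen; omega)
  have hchain : pvStops.foldl pvAstep p = p.take ((PySem.Chars.find p pvK).toNat + 5) := by
    rw [hfold, hstart, hs1, hc2', hs2, hs3, hs4]
  have hbslice : PySem.List.slice p none (some (pvBcut p)) = p.take (pvBcut p).toNat :=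
    PySem.List.slice_to p (pvBcut_nonneg p)
  have h4 : ((4000 : Int)).toNat = 4000 := rfl
  have hm5 : pvRlen p ((PySem.Chars.find p pvK).toNat + 5)
      = (PySem.Chars.find p pvK).toNat + 5 := by
    have hge := pvRlen_ge p (e := (PySem.Chars.find p pvK).toNat + 5)
      (k := (PySem.Chars.find p pvK).toNat + 4) (by omega) hY hwsY
    have hle := pvRlen_le p ((PySem.Chars.find p pvK).toNat + 5)
    omega
  rw [hchain, hbslice, pvStrip_take p hpl, pvStrip_take p hpl, hm5, hbm,
    PySem.List.slice_to _ (by norm_num), PySem.List.slice_to _ (by norm_num), h4,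
    List.take_take, List.take_take]
  intro heq
  have hlist := congrArg String.toList heq
  rw [String.toList_ofList, String.toList_ofList] at hlist
  have hlen := congrArg List.length hlist
  rw [List.length_take, List.length_take] at hlen
  have hle1 := pvRlen_le p (PySem.Chars.find p pvK).toNat
  have hplen : (PySem.Chars.find p pvK).toNat + 6 ≤ p.length := by
    have hL : pvK.length = 6 := hKlen
    omega
  omega
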